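-- pv_equiv track=rewrite | github.com/zet-root/esphome-components | esphome/espidf/framework.py | _detect_archive_root
-- ===== SOURCE A (Python) =====
-- from collections.abc import Iterable
--
-- def _detect_archive_root(names: Iterable[str]) -> str | None:
--     """Detect a single top-level directory shared by all archive entries.
--
--     Returns the directory name if every non-empty entry sits under the same
--     top-level directory, else ``None``. Extraction helpers use this to strip
--     the wrapper directory commonly found in source archives during extraction
--     rather than renaming it afterwards — post-extraction renames are
--     unreliable on Windows because antivirus and the search indexer briefly
--     hold handles on freshly written files.
--     """
--     root: str | None = None
--     has_descendant = False
--     for raw in names: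
--         name = raw.replace("\\", "/").strip("/")
--         if not name:
--             continue
--         first, sep, _ = name.partition("/")
--         if root is None:
--             root = first
--         elif root != first:
--             return None
--         if sep:
--             has_descendant = True
--     return root if has_descendant else None
-- ===== SOURCE B (Python) =====
-- def _lcp2(a, b):
--     i = 0
--     m = min(len(a), len(b))
--     while i < m and a[i] == b[i]:
--         i += 1
--     return a[:i]
--
--
-- def _detect_archive_root(names):
--     cleaned = [n for n in (r.replace("\\", "/").strip("/") for r in names) if n]
--     if not cleaned:
--         return None
--     prefix = cleaned[0] + "/"
--     for n in cleaned[1:]: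
--         prefix = _lcp2(prefix, n + "/")
--     j = prefix.find("/")
--     if j < 0:
--         return None
--     return prefix[:j] if any(len(n) > j for n in cleaned) else None
-- ===== Notes on version B (the rewrite author's own statement) =====
-- stated objective: alternative
-- what changed: Instead of comparing each entry's first path component against a tracked root with a has_descendant flag, B computes the character-level longest common prefix of all slash-terminated cleaned names by pairwise reduction, cuts it at its first '/', and decides the descendant question by a length comparison against that cut point.
import Mathlib
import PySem

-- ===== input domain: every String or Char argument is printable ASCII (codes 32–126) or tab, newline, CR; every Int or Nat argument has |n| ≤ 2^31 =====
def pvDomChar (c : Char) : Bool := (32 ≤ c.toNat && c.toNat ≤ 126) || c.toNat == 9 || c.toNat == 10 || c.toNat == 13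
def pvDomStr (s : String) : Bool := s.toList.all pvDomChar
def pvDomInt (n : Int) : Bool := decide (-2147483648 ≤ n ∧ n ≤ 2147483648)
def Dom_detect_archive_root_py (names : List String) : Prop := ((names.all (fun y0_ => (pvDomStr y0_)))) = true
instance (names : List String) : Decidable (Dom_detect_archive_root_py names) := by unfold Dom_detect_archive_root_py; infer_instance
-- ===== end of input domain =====

-- B replaces A's per-entry first-component comparison against a tracked root (with a
-- has_descendant flag) by a character-level longest-common-prefix reduction over all
-- slash-terminated cleaned names, cut at its first '/' (objective: alternative).

-- shared string helper: raw.replace("\\", "/").strip("/")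
def pyClean (r : String) : String := PySem.Str.stripChars (PySem.Str.replace r "\\" "/") "/"
-- A only: name.partition("/")[0]: PySem has no partition; for the one-char separator "/" it is
-- exactly the characters before the first '/' (the whole string if there is none) — exact
def pyFirst (s : String) : String := String.ofList (s.toList.takeWhile (fun x => x ≠ '/'))
-- A only: name.partition("/")[1] is nonempty  ⟺  "/" in name; exact for the one-char separator
def pySlash (s : String) : Bool := PySem.Str.isIn "/" s

-- ===== PORT A =====
-- the for-loop with state (root, has_descendant) and the early 'return None'
def aLoop (names : List String) (root : Option String) (hasDesc : Bool) : Option String :=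
  match names with
  | [] => if hasDesc then root else none
  | raw :: rest =>
    let name := pyClean raw
    if name = "" then aLoop rest root hasDesc
    else
      let first := pyFirst name
      let sep := pySlash name
      match root with
      | none => aLoop rest (some first) (hasDesc || sep)
      | some r => if r = first then aLoop rest (some r) (hasDesc || sep) else none

def detect_archive_root_py (names : List String) : Option String := aLoop names none false

-- ===== PORT B =====
-- _lcp2(a, b): scan both strings from the left while the characters agree, return the
-- common part (the while loop over index i, rendered as the structural scan it performs)
def lcp2Chars : List Char → List Char → List Char
  | a :: as, b :: bs => if a = b then a :: lcp2Chars as bs else []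
  | _, _ => []

def lcp2 (a b : String) : String := String.ofList (lcp2Chars a.toList b.toList)

-- cleaned = [n for n in (r.replace("\\","/").strip("/") for r in names) if n]
-- if not cleaned: return None
-- prefix = cleaned[0] + "/"; for n in cleaned[1:]: prefix = _lcp2(prefix, n + "/")
-- j = prefix.find("/"); if j < 0: return None
-- return prefix[:j] if any(len(n) > j for n in cleaned) else None
def detect_archive_root_py_alt (names : List String) : Option String :=
  let cleaned := (names.map pyClean).filter (fun n => n ≠ "")
  match cleaned with
  | [] => none
  | c0 :: rest =>
    let pfx := rest.foldl (fun acc n => lcp2 acc (n ++ "/")) (c0 ++ "/")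
    let j := PySem.Str.find pfx "/"
    if j < 0 then none
    else if (c0 :: rest).any (fun n => j < PySem.Str.len n) then
      some (PySem.Str.slice pfx none (some j))
    else none

-- ===== PRECONDITION & SPEC =====
def Spec_detect_archive_root_py (names : List String) (out : Option String) : Prop := out = detect_archive_root_py_alt names
instance (names : List String) (out : Option String) : Decidable (Spec_detect_archive_root_py names out) := by unfold Spec_detect_archive_root_py; infer_instance

-- ===== CLAIM (what is proved, stated in full; the proofs are below) =====
def Claim_equal_detect_archive_root_py : Prop := ∀ (names : List String), Dom_detect_archive_root_py names → Spec_detect_archive_root_py names (detect_archive_root_py names)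

-- ===== LEMMAS AND PROOFS =====

-- A-side characterisation on the cleaned list
def ASem (cl : List String) : Option String :=
  match cl with
  | [] => none
  | c0 :: rest =>
    if rest.all (fun n => pyFirst n == pyFirst c0) then
      if pySlash c0 || rest.any pySlash then some (pyFirst c0) else none
    else none

-- proof-only characterisation of A's loop once the root is fixed
def bCore (cl : List String) (r : String) (hd : Bool) : Option String :=
  if cl.all (fun n => pyFirst n == r) then
    (if hd || cl.any pySlash then some r else none)
  else none

-- once root is fixed to r, A's remaining loop is bCore on the cleaned tail
theorem aLoop_some (rest : List String) : ∀ (r : String) (hd : Bool),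
    aLoop rest (some r) hd = bCore ((rest.map pyClean).filter (fun n => n ≠ "")) r hd := by
  induction rest with
  | nil => intro r hd; simp [aLoop, bCore]
  | cons raw rest ih =>
    intro r hd
    simp only [aLoop, List.map_cons, List.filter_cons]
    by_cases hname : pyClean raw = ""
    · simp only [hname]
      simp [ih]
    · rw [if_neg hname]
      have hp : (decide ¬pyClean raw = "") = true := by simp [hname]
      simp only [ne_eq, hp, if_pos]
      by_cases hfirst : r = pyFirst (pyClean raw)
      · rw [if_pos hfirst, ih]
        unfold bCore
        rw [List.all_cons, List.any_cons]
        have hb : (pyFirst (pyClean raw) == r) = true := beq_iff_eq.mpr hfirst.symm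
        rw [hb, Bool.true_and, Bool.or_assoc]
      · rw [if_neg hfirst]
        unfold bCore
        rw [List.all_cons]
        have hb : (pyFirst (pyClean raw) == r) = false := by
          rw [beq_eq_false_iff_ne]; exact fun h => hfirst h.symm
        rw [hb, Bool.false_and]
        simp

theorem A_eq_ASem (names : List String) :
    detect_archive_root_py names = ASem ((names.map pyClean).filter (fun n => n ≠ "")) := by
  unfold detect_archive_root_py
  induction names with
  | nil => rfl
  | cons raw rest ih =>
    simp only [aLoop, List.map_cons, List.filter_cons]
    by_cases hname : pyClean raw = ""
    · simp only [hname]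
      simp [ih]
    · rw [if_neg hname]
      have hp : (decide ¬pyClean raw = "") = true := by simp [hname]
      simp only [ne_eq, hp, if_pos]
      rw [Bool.false_or, aLoop_some]
      unfold bCore ASem
      rfl

-- B equals its characterisation on the cleaned list
def BSem (cl : List String) : Option String :=
  match cl with
  | [] => none
  | c0 :: rest =>
    let pfx := rest.foldl (fun acc n => lcp2 acc (n ++ "/")) (c0 ++ "/")
    let j := PySem.Str.find pfx "/"
    if j < 0 then none
    else if (c0 :: rest).any (fun n => j < PySem.Str.len n) then
      some (PySem.Str.slice pfx none (some j))
    else none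

theorem alt_eq_BSem (names : List String) :
    detect_archive_root_py_alt names = BSem ((names.map pyClean).filter (fun n => n ≠ "")) := rfl

-- basic facts about lcp2Chars
theorem lcp2Chars_prefix_left (a : List Char) : ∀ (b : List Char), lcp2Chars a b <+: a := by
  induction a with
  | nil => intro b; cases b <;> simp [lcp2Chars]
  | cons x as ih =>
    intro b
    cases b with
    | nil => simp [lcp2Chars]
    | cons y bs =>
      simp only [lcp2Chars]
      split_ifs with h
      · exact List.cons_prefix_cons.mpr ⟨rfl, ih bs⟩
      · exact List.nil_prefix

theorem lcp2Chars_prefix_right (a : List Char) : ∀ (b : List Char), lcp2Chars a b <+: b := by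
  induction a with
  | nil => intro b; cases b <;> simp [lcp2Chars]
  | cons x as ih =>
    intro b
    cases b with
    | nil => simp [lcp2Chars]
    | cons y bs =>
      simp only [lcp2Chars]
      split_ifs with h
      · subst h; exact List.cons_prefix_cons.mpr ⟨rfl, ih bs⟩
      · exact List.nil_prefix

theorem prefix_lcp2Chars (s : List Char) : ∀ (a b : List Char),
    s <+: a → s <+: b → s <+: lcp2Chars a b := by
  induction s with
  | nil => intro a b _ _; exact List.nil_prefix
  | cons x t ih =>
    intro a b h1 h2
    cases a with
    | nil => simp at h1
    | cons ah as =>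
      cases b with
      | nil => simp at h2
      | cons bh bs =>
        rw [List.cons_prefix_cons] at h1 h2
        obtain ⟨rfl, h1⟩ := h1
        obtain ⟨hb, h2⟩ := h2
        simp only [lcp2Chars, ← hb, if_pos]
        exact List.cons_prefix_cons.mpr ⟨rfl, ih as bs h1 h2⟩

theorem toList_lcp2 (a b : String) : (lcp2 a b).toList = lcp2Chars a.toList b.toList := by
  simp [lcp2]

theorem toList_slash : ("/" : String).toList = ['/'] := by decide

theorem toList_append_slash (n : String) : (n ++ "/").toList = n.toList ++ ['/'] := by
  rw [String.toList_append, toList_slash]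

-- the folded prefix is a prefix of the seed and of every slash-terminated element
theorem fold_bounds (rest : List String) : ∀ (a : String),
    (rest.foldl (fun acc n => lcp2 acc (n ++ "/")) a).toList <+: a.toList ∧
    ∀ n ∈ rest, (rest.foldl (fun acc n => lcp2 acc (n ++ "/")) a).toList <+: n.toList ++ ['/'] := by
  induction rest with
  | nil => intro a; exact ⟨List.prefix_refl _, by simp⟩
  | cons n ns ih =>
    intro a
    obtain ⟨h1, h2⟩ := ih (lcp2 a (n ++ "/"))
    rw [toList_lcp2] at h1
    refine ⟨h1.trans (lcp2Chars_prefix_left _ _), ?_⟩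
    intro m hm
    rcases List.mem_cons.mp hm with rfl | hm
    · exact h1.trans (by rw [← toList_append_slash]; exact lcp2Chars_prefix_right _ _)
    · exact h2 m hm

-- any common prefix of the seed and of every slash-terminated element survives the fold
theorem fold_lower (rest : List String) : ∀ (a : String) (s : List Char),
    s <+: a.toList → (∀ n ∈ rest, s <+: n.toList ++ ['/']) →
    s <+: (rest.foldl (fun acc n => lcp2 acc (n ++ "/")) a).toList := by
  induction rest with
  | nil => intro a s h _; exact h
  | cons n ns ih =>
    intro a s h hall
    apply ih (lcp2 a (n ++ "/")) s
    · rw [toList_lcp2]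
      exact prefix_lcp2Chars s _ _ h (by rw [toList_append_slash]; exact hall n (by simp))
    · intro m hm; exact hall m (by simp [hm])

theorem dropWhile_head_slash {l : List Char} {c : Char} {t : List Char}
    (h : l.dropWhile (fun x => x ≠ '/') = c :: t) : c = '/' := by
  induction l with
  | nil => simp [List.dropWhile] at h
  | cons a as ih =>
    rw [List.dropWhile_cons] at h
    by_cases ha : a = '/'
    · rw [if_neg (by simp [ha])] at h
      have h1 : a = c := (List.cons_eq_cons.mp h).1
      rw [← h1]; exact ha
    · rw [if_pos (by simp [ha])] at h
      exact ih h

theorem singleton_prefix_iff (u : List Char) (c : Char) : [c] <+: u ↔ u.head? = some c := by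
  cases u with
  | nil => simp
  | cons a as => simp [List.cons_prefix_cons, eq_comm]

-- the first component, slash-terminated, is a prefix of the slash-terminated name
theorem pf_slash_prefix (l : List Char) :
    (l.takeWhile (fun x => x ≠ '/')) ++ ['/'] <+: l ++ ['/'] := by
  cases hd : l.dropWhile (fun x => x ≠ '/') with
  | nil =>
    have htw : l.takeWhile (fun x => x ≠ '/') = l := by
      have := List.takeWhile_append_dropWhile (p := fun x => decide (x ≠ '/')) (l := l)
      rw [hd, List.append_nil] at this
      exact this
    rw [htw]
  | cons d t =>
    have hc : d = '/' := dropWhile_head_slash hd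
    have hl : l = l.takeWhile (fun x => x ≠ '/') ++ '/' :: t := by
      have h0 := List.takeWhile_append_dropWhile (p := fun x => decide (x ≠ '/')) (l := l)
      rw [hd, hc] at h0
      exact h0.symm
    refine ⟨t ++ ['/'], ?_⟩
    conv_rhs => rw [hl]
    simp

-- str.find on r ++ "/" ++ t with '/' ∉ r points exactly at |r|
theorem find_at_slash (r t : List Char) (hr : '/' ∉ r) :
    PySem.Chars.find (r ++ '/' :: t) ['/'] = (r.length : Int) := by
  have hinf : ['/'] <:+: r ++ '/' :: t := by
    rw [List.singleton_infix_iff]; simp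
  have hnn : 0 ≤ PySem.Chars.find (r ++ '/' :: t) ['/'] :=
    (PySem.Chars.find_nonneg_iff _ _).mpr hinf
  obtain ⟨hpre, hmin⟩ := PySem.Chars.find_spec hnn
  have hdrop : (r ++ '/' :: t).drop r.length = '/' :: t := List.drop_left
  have hk_le : ¬ r.length < (PySem.Chars.find (r ++ '/' :: t) ['/']).toNat := fun h =>
    hmin r.length h (by rw [hdrop]; exact List.cons_prefix_cons.mpr ⟨rfl, List.nil_prefix⟩)
  have hk_ge : ¬ (PySem.Chars.find (r ++ '/' :: t) ['/']).toNat < r.length := by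
    intro h
    have h1 : (r ++ '/' :: t)[(PySem.Chars.find (r ++ '/' :: t) ['/']).toNat]? = some '/' := by
      rw [← List.head?_drop]
      exact (singleton_prefix_iff _ _).mp hpre
    rw [List.getElem?_append_left (by omega)] at h1
    rw [List.getElem?_eq_getElem h] at h1
    exact hr (by rw [← Option.some_inj.mp h1]; exact List.getElem_mem h)
  have hk : (PySem.Chars.find (r ++ '/' :: t) ['/']).toNat = r.length := by omega
  rw [← Int.toNat_of_nonneg hnn, hk]

theorem takeWhile_append_stop (q : List Char) (u : List Char) (hq : '/' ∉ q) :
    (q ++ '/' :: u).takeWhile (fun x => x ≠ '/') = q := by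
  induction q with
  | nil => simp
  | cons a as ih =>
    have ha : a ≠ '/' := fun h => hq (by simp [h])
    rw [List.cons_append, List.takeWhile_cons, if_pos (by simp [ha])]
    rw [ih (fun h => hq (List.mem_cons_of_mem a h))]

-- a slash-terminated common prefix with no '/' inside determines the first component
theorem root_of_prefix (q l : List Char) (hq : '/' ∉ q)
    (h : q ++ ['/'] <+: l ++ ['/']) : l.takeWhile (fun x => x ≠ '/') = q := by
  obtain ⟨t, ht⟩ := h
  have hlen : q.length ≤ l.length := by
    have := congrArg List.length ht; simp at this; omega
  have htake : l.take q.length = q := by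
    have h1 : (l ++ ['/']).take q.length = l.take q.length := List.take_append_of_le_length hlen
    have h2 : ((q ++ ['/']) ++ t).take q.length = q := by
      rw [List.append_assoc, List.take_append_of_le_length (le_refl _), List.take_length]
    rw [← ht, h2] at h1
    exact h1.symm
  cases hd : l.drop q.length with
  | nil =>
    have hlq : l = q := by
      have := List.take_append_drop q.length l
      rw [htake, hd, List.append_nil] at this
      exact this.symm
    rw [hlq, List.takeWhile_eq_self_iff]
    intro a ha
    simp only [ne_eq, decide_not, Bool.not_eq_eq_eq_not, Bool.not_true, decide_eq_false_iff_not]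
    exact fun h => hq (h ▸ ha)
  | cons c u =>
    have hlt : q.length < l.length := by
      have := congrArg List.length (List.take_append_drop q.length l)
      rw [htake, hd] at this
      simp at this; omega
    have hc : c = '/' := by
      have e2 : l[q.length]? = some c := by rw [← List.head?_drop, hd]; rfl
      have e3 : ((q ++ ['/']) ++ t)[q.length]? = some '/' := by
        rw [List.append_assoc, List.getElem?_append_right (le_refl _)]
        simp
      rw [ht, List.getElem?_append_left hlt, e2] at e3
      exact (Option.some_inj.mp e3)
    have hl : l = q ++ '/' :: u := by
      rw [← List.take_append_drop q.length l, htake, hd, hc]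
    rw [hl]
    exact takeWhile_append_stop q u hq

-- '/' occurs in l iff the first component is shorter than l
theorem slash_mem_iff_lt (l : List Char) :
    '/' ∈ l ↔ (l.takeWhile (fun x => x ≠ '/')).length < l.length := by
  constructor
  · intro h
    cases hd : l.dropWhile (fun x => x ≠ '/') with
    | nil =>
      exfalso
      have htw : l.takeWhile (fun x => x ≠ '/') = l := by
        have := List.takeWhile_append_dropWhile (p := fun x => decide (x ≠ '/')) (l := l)
        rw [hd, List.append_nil] at this
        exact this
      have h2 := List.mem_takeWhile_imp (htw ▸ h)
      simp at h2
    | cons d t =>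
      have hlen := congrArg List.length
        (List.takeWhile_append_dropWhile (p := fun x => decide (x ≠ '/')) (l := l))
      rw [hd] at hlen
      simp only [List.length_append, List.length_cons] at hlen
      omega
  · intro h
    cases hd : l.dropWhile (fun x => x ≠ '/') with
    | nil =>
      exfalso
      have hlen := congrArg List.length
        (List.takeWhile_append_dropWhile (p := fun x => decide (x ≠ '/')) (l := l))
      rw [hd] at hlen
      simp only [List.length_append, List.length_nil] at hlen
      omega
    | cons d t =>
      have hc : d = '/' := dropWhile_head_slash hd
      have hdm : d ∈ l := by
        have h0 := List.takeWhile_append_dropWhile (p := fun x => decide (x ≠ '/')) (l := l)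
        rw [hd] at h0
        rw [← h0]
        simp
      rw [← hc]; exact hdm

theorem pySlash_iff (n : String) : pySlash n = true ↔ '/' ∈ n.toList := by
  rw [pySlash, PySem.Str.isIn_iff_infix, toList_slash, List.singleton_infix_iff]

theorem toList_pyFirst (s : String) :
    (pyFirst s).toList = s.toList.takeWhile (fun x => x ≠ '/') := by
  simp [pyFirst]

-- the heart: both characterisations agree on every cleaned list
theorem BSem_eq_ASem (cl : List String) : BSem cl = ASem cl := by
  cases cl with
  | nil => rfl
  | cons c0 rest =>
    simp only [BSem, ASem]
    by_cases hall : (rest.all fun n => pyFirst n == pyFirst c0) = true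
    · rw [if_pos hall]
      have hrne : '/' ∉ c0.toList.takeWhile (fun x => x ≠ '/') := by
        intro hmem
        have := List.mem_takeWhile_imp hmem
        simp at this
      have hpf : ∀ n ∈ c0 :: rest,
          n.toList.takeWhile (fun x => x ≠ '/') = c0.toList.takeWhile (fun x => x ≠ '/') := by
        intro n hn
        rcases List.mem_cons.mp hn with rfl | hn
        · rfl
        · have := beq_iff_eq.mp (List.all_eq_true.mp hall n hn)
          have := congrArg String.toList this
          rwa [toList_pyFirst, toList_pyFirst] at this
      have hPpre : (c0.toList.takeWhile (fun x => x ≠ '/')) ++ ['/'] <+: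
          (rest.foldl (fun acc n => lcp2 acc (n ++ "/")) (c0 ++ "/")).toList := by
        apply fold_lower
        · rw [toList_append_slash]; exact pf_slash_prefix c0.toList
        · intro n hn
          rw [← hpf n (by simp [hn])]
          exact pf_slash_prefix n.toList
      obtain ⟨t, ht⟩ := hPpre
      have hFt : (rest.foldl (fun acc n => lcp2 acc (n ++ "/")) (c0 ++ "/")).toList =
          (c0.toList.takeWhile (fun x => x ≠ '/')) ++ '/' :: t := by
        rw [← ht]; simp
      have hfind : PySem.Str.find (rest.foldl (fun acc n => lcp2 acc (n ++ "/")) (c0 ++ "/")) "/" =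
          ((c0.toList.takeWhile (fun x => x ≠ '/')).length : Int) := by
        rw [PySem.Str.find_eq, toList_slash, hFt]
        exact find_at_slash _ t hrne
      rw [hfind, if_neg (by omega)]
      have hany : ((c0 :: rest).any fun n =>
          decide (((c0.toList.takeWhile (fun x => x ≠ '/')).length : Int) < PySem.Str.len n)) =
          (pySlash c0 || rest.any pySlash) := by
        rw [← List.any_cons]
        apply PySem.List.any_congr_mem
        intro n hn
        rw [Bool.eq_iff_iff]
        rw [decide_eq_true_iff, PySem.Str.len_eq, pySlash_iff, slash_mem_iff_lt, hpf n hn]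
        constructor <;> intro h <;> exact_mod_cast h
      rw [hany]
      have hslice : PySem.Str.slice (rest.foldl (fun acc n => lcp2 acc (n ++ "/")) (c0 ++ "/"))
          none (some ((c0.toList.takeWhile (fun x => x ≠ '/')).length : Int)) = pyFirst c0 := by
        apply String.toList_inj.mp
        rw [toList_pyFirst]
        simp only [PySem.Str.toList_slice, PySem.Chars.slice_eq_listSlice]
        rw [PySem.List.slice_to_natCast, hFt, List.take_left]
      rw [hslice]
    · rw [if_neg hall]
      obtain ⟨n, hn, hne⟩ : ∃ n ∈ rest, ¬ (pyFirst n == pyFirst c0) = true := by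
        by_contra h
        push Not at h
        exact hall (List.all_eq_true.mpr h)
      have hnoslash : '/' ∉ (rest.foldl (fun acc n => lcp2 acc (n ++ "/")) (c0 ++ "/")).toList := by
        intro hmem
        set P := (rest.foldl (fun acc n => lcp2 acc (n ++ "/")) (c0 ++ "/")).toList with hP
        have hdw : P.dropWhile (fun x => x ≠ '/') ≠ [] := by
          intro h0
          have htw : P.takeWhile (fun x => x ≠ '/') = P := by
            have := List.takeWhile_append_dropWhile (p := fun x => decide (x ≠ '/')) (l := P)
            rw [h0, List.append_nil] at this
            exact this
          have := List.mem_takeWhile_imp (htw ▸ hmem)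
          simp at this
        obtain ⟨d, u, hd⟩ := List.exists_cons_of_ne_nil hdw
        have hc : d = '/' := dropWhile_head_slash hd
        have hqp : (P.takeWhile (fun x => x ≠ '/')) ++ ['/'] <+: P := by
          refine ⟨u, ?_⟩
          have h0 := List.takeWhile_append_dropWhile (p := fun x => decide (x ≠ '/')) (l := P)
          rw [hd, hc] at h0
          rw [List.append_assoc, List.singleton_append]
          exact h0
        have hq : '/' ∉ P.takeWhile (fun x => x ≠ '/') := by
          intro h
          have := List.mem_takeWhile_imp h
          simp at this
        obtain ⟨hA, hAll⟩ := fold_bounds rest (c0 ++ "/")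
        rw [toList_append_slash] at hA
        have e1 := root_of_prefix _ c0.toList hq (hqp.trans hA)
        have e2 := root_of_prefix _ n.toList hq (hqp.trans (hAll n hn))
        apply hne
        rw [beq_iff_eq]
        apply String.toList_inj.mp
        rw [toList_pyFirst, toList_pyFirst, e1, e2]
      have hfind : PySem.Str.find (rest.foldl (fun acc n => lcp2 acc (n ++ "/")) (c0 ++ "/")) "/" = -1 := by
        rw [PySem.Str.find_eq, toList_slash]
        exact (PySem.Chars.find_eq_neg_one_iff _ _).mpr
          (fun h => hnoslash ((List.singleton_infix_iff _ _).mp h))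
      rw [hfind]
      simp

-- ===== VERDICT (by name: the statement is the Claim_ definition above) =====
theorem detect_archive_root_py_spec : Claim_equal_detect_archive_root_py := by
  intro names _
  unfold Spec_detect_archive_root_py
  rw [A_eq_ASem, alt_eq_BSem, BSem_eq_ASem]
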